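-- pv_equiv track=rewrite | github.com/SamantazFox/AoC-2020 | day_17/solve.py | copyExpand
-- ===== SOURCE A (Python) =====
-- def copyExpand(arr):
-- 	out = {}
--
-- 	min_x,max_x = min(arr      ) - 1, max(arr      ) + 1
-- 	min_y,max_y = min(arr[0]   ) - 1, max(arr[0]   ) + 1
-- 	min_z,max_z = min(arr[0][0]) - 1, max(arr[0][0]) + 1
--
-- 	for x in range(min_x,max_x+1):
-- 		if x not in out: out[x] = {}
--
-- 		for y in range(min_y,max_y+1):
-- 			if y not in out[x]: out[x][y] = {}
--
-- 			for z in range(min_z,max_z+1):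
-- 				if (x in arr) and (y in arr[x]) and (z in arr[x][y]):
-- 					out[x][y][z] = arr[x][y][z]
-- 				else:
-- 					out[x][y][z] = '.'
--
-- 	return out
-- ===== SOURCE B (Python) =====
-- def copyExpand(arr):
-- 	min_x, max_x = min(arr) - 1, max(arr) + 1
-- 	min_y, max_y = min(arr[0]) - 1, max(arr[0]) + 1
-- 	min_z, max_z = min(arr[0][0]) - 1, max(arr[0][0]) + 1
--
-- 	# pass 1: dense grid of '.' over the expanded bounds
-- 	out = {
-- 		x: {y: {z: '.' for z in range(min_z, max_z + 1)}
-- 		    for y in range(min_y, max_y + 1)}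
-- 		for x in range(min_x, max_x + 1)
-- 	}
--
-- 	# pass 2: overlay the existing cells that fall inside the bounds
-- 	for x, plane in arr.items():
-- 		if min_x <= x <= max_x:
-- 			for y, row in plane.items():
-- 				if min_y <= y <= max_y:
-- 					for z, v in row.items():
-- 						if min_z <= z <= max_z:
-- 							out[x][y][z] = v
-- 	return out
-- ===== Notes on version B (the rewrite author's own statement) =====
-- stated objective: alternative
-- what changed: A fills the expanded grid cell by cell with a fused triple range-loop doing a per-cell membership test into arr; B first builds the whole dense '.' grid over the expanded bounds by comprehension and then overlays the existing in-bounds cells by iterating the input's nested entries.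
import Mathlib
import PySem

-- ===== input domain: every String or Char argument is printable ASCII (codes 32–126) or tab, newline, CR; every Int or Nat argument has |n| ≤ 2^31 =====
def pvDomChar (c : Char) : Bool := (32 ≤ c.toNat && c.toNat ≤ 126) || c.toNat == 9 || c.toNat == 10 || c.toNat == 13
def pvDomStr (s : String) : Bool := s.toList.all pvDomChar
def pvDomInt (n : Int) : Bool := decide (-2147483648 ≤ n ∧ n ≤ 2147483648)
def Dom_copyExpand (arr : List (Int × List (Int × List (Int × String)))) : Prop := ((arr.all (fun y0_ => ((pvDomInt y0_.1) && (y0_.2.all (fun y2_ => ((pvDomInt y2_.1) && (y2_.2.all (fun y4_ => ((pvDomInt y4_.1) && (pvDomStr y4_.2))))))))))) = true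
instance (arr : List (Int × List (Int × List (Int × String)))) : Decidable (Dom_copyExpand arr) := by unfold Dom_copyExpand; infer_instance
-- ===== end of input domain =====

-- B replaces A's fused triple range-loop with per-cell membership tests by two passes: build the
-- dense '.' grid over the expanded bounds by comprehension, then overlay the existing in-bounds
-- cells by iterating the input's nested entries (alternative decomposition, same cost class).
-- Equality is about the returned dict (nothing is mutated).

-- ===== PORT A =====
-- A works on the nested dict; we lift the association-list argument into PySem.Dict once.
def pvToD (arr : List (Int × List (Int × List (Int × String)))) :
    PySem.Dict Int (PySem.Dict Int (PySem.Dict Int String)) :=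
  PySem.Dict.mk (arr.map (fun p => (p.1, PySem.Dict.mk (p.2.map (fun q => (q.1, PySem.Dict.mk q.2))))))

def pvFromD (d : PySem.Dict Int (PySem.Dict Int (PySem.Dict Int String))) :
    List (Int × List (Int × List (Int × String))) :=
  d.items.map (fun p => (p.1, p.2.items.map (fun q => (q.1, q.2.items))))

def copyExpand (arr : List (Int × List (Int × List (Int × String)))) : List (Int × List (Int × List (Int × String))) :=
  let dA := pvToD arr
  let mnx := (PySem.List.min? dA.keys (fun k => k)).getD 0 - 1
  let mxx := (PySem.List.max? dA.keys (fun k => k)).getD 0 + 1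
  let p0 := dA.getD 0 PySem.Dict.empty
  let mny := (PySem.List.min? p0.keys (fun k => k)).getD 0 - 1
  let mxy := (PySem.List.max? p0.keys (fun k => k)).getD 0 + 1
  let r0 := p0.getD 0 PySem.Dict.empty
  let mnz := (PySem.List.min? r0.keys (fun k => k)).getD 0 - 1
  let mxz := (PySem.List.max? r0.keys (fun k => k)).getD 0 + 1
  let out := (PySem.List.pyRange mnx (mxx+1) 1).foldl (fun out x =>
    let out := if out.contains x then out else out.insert x PySem.Dict.empty
    (PySem.List.pyRange mny (mxy+1) 1).foldl (fun out y =>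
      let out := if (out.getD x PySem.Dict.empty).contains y then out
                 else out.modify x PySem.Dict.empty (fun dx => dx.insert y PySem.Dict.empty)
      (PySem.List.pyRange mnz (mxz+1) 1).foldl (fun out z =>
        out.modify x PySem.Dict.empty (fun dx => dx.modify y PySem.Dict.empty (fun dy => dy.insert z (
          if dA.contains x && (dA.getD x PySem.Dict.empty).contains y
              && ((dA.getD x PySem.Dict.empty).getD y PySem.Dict.empty).contains z
          then ((dA.getD x PySem.Dict.empty).getD y PySem.Dict.empty).getD z "."
          else ".")))) out) out) PySem.Dict.empty
  pvFromD out

-- ===== PORT B =====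
-- B touches dicts only through key lists, first-match lookup and in-place overwrite of an
-- existing key; on the association lists these are `map Prod.fst`, `find?` and a key-preserving
-- `map`, so B's port works on the plain nested lists directly.
def pvLk {ν : Type} (l : List (Int × ν)) (k : Int) : Option ν :=
  (l.find? (fun p => p.1 == k)).map Prod.snd

-- out[x][y][z] = v for a key triple present in the dense grid (overwrite keeps position).
def pvSet3 (out : List (Int × List (Int × List (Int × String)))) (x y z : Int) (v : String) :
    List (Int × List (Int × List (Int × String))) :=
  out.map (fun xp => if xp.1 == x then
    (xp.1, xp.2.map (fun yp => if yp.1 == y then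
      (yp.1, yp.2.map (fun zp => if zp.1 == z then (zp.1, v) else zp)) else yp)) else xp)

def copyExpand_alt (arr : List (Int × List (Int × List (Int × String)))) : List (Int × List (Int × List (Int × String))) :=
  let mnx := (PySem.List.min? (arr.map Prod.fst) (fun k => k)).getD 0 - 1
  let mxx := (PySem.List.max? (arr.map Prod.fst) (fun k => k)).getD 0 + 1
  let p0 := (pvLk arr 0).getD []
  let mny := (PySem.List.min? (p0.map Prod.fst) (fun k => k)).getD 0 - 1
  let mxy := (PySem.List.max? (p0.map Prod.fst) (fun k => k)).getD 0 + 1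
  let r0 := (pvLk p0 0).getD []
  let mnz := (PySem.List.min? (r0.map Prod.fst) (fun k => k)).getD 0 - 1
  let mxz := (PySem.List.max? (r0.map Prod.fst) (fun k => k)).getD 0 + 1
  -- pass 1: dense grid of '.'
  let dense := (PySem.List.pyRange mnx (mxx+1) 1).map (fun x =>
    (x, (PySem.List.pyRange mny (mxy+1) 1).map (fun y =>
      (y, (PySem.List.pyRange mnz (mxz+1) 1).map (fun z => (z, "."))))))
  -- pass 2: overlay existing in-bounds cells
  arr.foldl (fun out xp =>
    if mnx ≤ xp.1 ∧ xp.1 ≤ mxx then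
      xp.2.foldl (fun out yp =>
        if mny ≤ yp.1 ∧ yp.1 ≤ mxy then
          yp.2.foldl (fun out zp =>
            if mnz ≤ zp.1 ∧ zp.1 ≤ mxz then pvSet3 out xp.1 yp.1 zp.1 zp.2 else out) out
        else out) out
    else out) dense

-- ===== PRECONDITION & SPEC =====
-- Pre_ excludes exactly the inputs where the Python A raises (empty dict, key 0 missing at the
-- first two levels, or an empty inner dict: ValueError/KeyError), and association lists with
-- duplicate keys at some level, which do not represent any Python dict (a dict's keys are unique).
def Pre_copyExpand (arr : List (Int × List (Int × List (Int × String)))) : Prop :=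
  (arr.map Prod.fst).Nodup ∧
  (∀ p ∈ arr, (p.2.map Prod.fst).Nodup ∧ ∀ q ∈ p.2, (q.2.map Prod.fst).Nodup) ∧
  (∃ p ∈ arr, p.1 = 0 ∧ p.2 ≠ [] ∧ ∃ q ∈ p.2, q.1 = 0 ∧ q.2 ≠ [])
instance (arr : List (Int × List (Int × List (Int × String)))) : Decidable (Pre_copyExpand arr) := by
  unfold Pre_copyExpand; infer_instance

def pvWitness_copyExpand : (List (Int × List (Int × List (Int × String)))) := [(0, [(0, [(0, "#")])])]

def Spec_copyExpand (arr : List (Int × List (Int × List (Int × String)))) (out : List (Int × List (Int × List (Int × String)))) : Prop := out = copyExpand_alt arr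
instance (arr : List (Int × List (Int × List (Int × String)))) (out : List (Int × List (Int × List (Int × String)))) : Decidable (Spec_copyExpand arr out) := by unfold Spec_copyExpand; infer_instance

-- ===== CLAIM (what is proved, stated in full; the proofs are below) =====
def Claim_equal_copyExpand : Prop := ∀ (arr : List (Int × List (Int × List (Int × String)))), Dom_copyExpand arr → Pre_copyExpand arr → Spec_copyExpand arr (copyExpand arr)

-- ===== LEMMAS AND PROOFS =====

abbrev RowT := PySem.Dict Int String
abbrev PlaneT := PySem.Dict Int RowT
abbrev GridT := PySem.Dict Int PlaneT

-- basic dict lemmas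
theorem pv_contains_mk_false {ν : Type} (l : List (Int × ν)) (k : Int)
    (h : k ∉ l.map Prod.fst) : (PySem.Dict.mk l).contains k = false := by
  rw [PySem.Dict.contains_eq_decide_mem_keys]
  simp [PySem.Dict.keys, h]

theorem pv_modify_insert_self {κ ν : Type} [BEq κ] [LawfulBEq κ]
    (d : PySem.Dict κ ν) (k : κ) (v d0 : ν) (f : ν → ν) :
    (d.insert k v).modify k d0 f = d.insert k (f v) := by
  rw [PySem.Dict.modify, PySem.Dict.getD_insert_self, PySem.Dict.insert_insert_self]

theorem pv_insert_not_contains {κ ν : Type} [BEq κ] (d : PySem.Dict κ ν) (k : κ) (v : ν)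
    (h : d.contains k = false) : d.insert k v = PySem.Dict.mk (d.items ++ [(k, v)]) := by
  apply PySem.Dict.ext
  rw [PySem.Dict.items_insert_of_not_contains (h := h)]

-- ===== A-side characterisation =====
theorem pvA_foldl_modify_insert {β ν : Type} (l : List β) (d : PySem.Dict Int ν) (k : Int)
    (d0 : ν) (p : ν) (g : β → ν → ν) :
    l.foldl (fun o b => o.modify k d0 (g b)) (d.insert k p)
      = d.insert k (l.foldl (fun v b => g b v) p) := by
  induction l generalizing p with
  | nil => rfl
  | cons b t ih =>
    simp only [List.foldl_cons]
    rw [pv_modify_insert_self]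
    exact ih _

theorem pvA_zrow (zs : List Int) (v : Int → String) (hnd : zs.Nodup) :
    zs.foldl (fun dy z => dy.insert z (v z)) (PySem.Dict.empty : RowT)
      = PySem.Dict.mk (zs.map (fun z => (z, v z))) := by
  apply PySem.Dict.ext
  have h := PySem.Dict.items_foldl_insert_fresh (l := zs) (d := (PySem.Dict.empty : RowT))
    (k := fun z => z) (v := fun z => v z)
    (fun a _ => PySem.Dict.contains_empty a) (by simpa using hnd)
  simpa using h

theorem pvA_yfold (ys zs : List Int) (x : Int) (v : Int → Int → String) (d : GridT) (p : PlaneT) :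
    ys.foldl (fun o y =>
      (zs.foldl (fun o z => o.modify x PySem.Dict.empty
          (fun dx => dx.modify y PySem.Dict.empty (fun dy => dy.insert z (v y z))))
        (if (o.getD x PySem.Dict.empty).contains y then o
         else o.modify x PySem.Dict.empty (fun dx => dx.insert y PySem.Dict.empty))))
      (d.insert x p)
    = d.insert x (ys.foldl (fun p y =>
        zs.foldl (fun p z => p.modify y PySem.Dict.empty (fun dy => dy.insert z (v y z)))
          (if p.contains y then p else p.insert y PySem.Dict.empty)) p) := by
  induction ys generalizing p with
  | nil => rfl
  | cons y t ih =>
    simp only [List.foldl_cons]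
    rw [PySem.Dict.getD_insert_self]
    by_cases hc : p.contains y = true
    · rw [if_pos hc, if_pos hc, pvA_foldl_modify_insert, ih]
    · rw [if_neg hc, if_neg hc, pv_modify_insert_self, pvA_foldl_modify_insert, ih]

theorem pvA_plane (ys zs : List Int) (v : Int → Int → String) (hzs : zs.Nodup) :
    ∀ acc : List (Int × RowT), (acc.map Prod.fst ++ ys).Nodup →
    ys.foldl (fun p y =>
        zs.foldl (fun p z => p.modify y PySem.Dict.empty (fun dy => dy.insert z (v y z)))
          (if p.contains y then p else p.insert y PySem.Dict.empty)) (PySem.Dict.mk acc)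
    = PySem.Dict.mk (acc ++ ys.map (fun y => (y, PySem.Dict.mk (zs.map (fun z => (z, v y z)))))) := by
  induction ys with
  | nil => intro acc _; simp
  | cons y t ih =>
    intro acc h
    have hy : y ∉ acc.map Prod.fst := by
      have hd := List.disjoint_of_nodup_append h
      exact fun hmem => hd hmem (List.mem_cons_self)
    have hcon := pv_contains_mk_false acc y hy
    simp only [List.foldl_cons]
    rw [if_neg (by simp [hcon]), pvA_foldl_modify_insert, pvA_zrow zs (v y) hzs,
        pv_insert_not_contains _ _ _ hcon,
        ih (acc ++ [(y, PySem.Dict.mk (zs.map (fun z => (z, v y z))))]) (by simpa using h)]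
    simp

theorem pvA_grid (xs ys zs : List Int) (v : Int → Int → Int → String) (hys : ys.Nodup) (hzs : zs.Nodup) :
    ∀ acc : List (Int × PlaneT), (acc.map Prod.fst ++ xs).Nodup →
    xs.foldl
      (fun out x =>
        ys.foldl
          (fun out y =>
            zs.foldl
              (fun out z =>
                out.modify x PySem.Dict.empty
                  (fun dx => dx.modify y PySem.Dict.empty
                    (fun dy => dy.insert z (v x y z))))
              (if (out.getD x PySem.Dict.empty).contains y then out
               else out.modify x PySem.Dict.empty (fun dx => dx.insert y PySem.Dict.empty)))
          (if out.contains x then out else out.insert x PySem.Dict.empty))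
      (PySem.Dict.mk acc)
    = PySem.Dict.mk (acc ++ xs.map (fun x =>
        (x, PySem.Dict.mk (ys.map (fun y =>
          (y, PySem.Dict.mk (zs.map (fun z => (z, v x y z))))))))) := by
  induction xs with
  | nil => intro acc _; simp
  | cons x t ih =>
    intro acc h
    have hx : x ∉ acc.map Prod.fst := by
      have hd := List.disjoint_of_nodup_append h
      exact fun hmem => hd hmem (List.mem_cons_self)
    have hcon := pv_contains_mk_false acc x hx
    simp only [List.foldl_cons]
    rw [if_neg (by simp [hcon]), pvA_yfold]
    have hp := pvA_plane ys zs (fun y z => v x y z) hzs [] (by simpa using hys)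
    simp only [List.nil_append] at hp
    rw [show (PySem.Dict.mk [] : PlaneT) = PySem.Dict.empty from rfl] at hp
    rw [hp]
    rw [pv_insert_not_contains _ _ _ hcon,
        ih (acc ++ [(x, PySem.Dict.mk (ys.map (fun y =>
          (y, PySem.Dict.mk (zs.map (fun z => (z, v x y z)))))))]) (by simpa using h)]
    simp

theorem pvA_grid0 (xs ys zs : List Int) (v : Int → Int → Int → String)
    (hxs : xs.Nodup) (hys : ys.Nodup) (hzs : zs.Nodup) :
    xs.foldl
      (fun out x =>
        ys.foldl
          (fun out y =>
            zs.foldl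
              (fun out z =>
                out.modify x PySem.Dict.empty
                  (fun dx => dx.modify y PySem.Dict.empty
                    (fun dy => dy.insert z (v x y z))))
              (if (out.getD x PySem.Dict.empty).contains y then out
               else out.modify x PySem.Dict.empty (fun dx => dx.insert y PySem.Dict.empty)))
          (if out.contains x then out else out.insert x PySem.Dict.empty))
      PySem.Dict.empty
    = PySem.Dict.mk (xs.map (fun x =>
        (x, PySem.Dict.mk (ys.map (fun y =>
          (y, PySem.Dict.mk (zs.map (fun z => (z, v x y z))))))))) := by
  have h := pvA_grid xs ys zs v hys hzs [] (by simpa using hxs)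
  simp only [List.nil_append] at h
  exact h

-- the per-cell value A stores
def pvVal (dA : GridT) (x y z : Int) : String :=
  if dA.contains x && (dA.getD x PySem.Dict.empty).contains y
      && ((dA.getD x PySem.Dict.empty).getD y PySem.Dict.empty).contains z
  then ((dA.getD x PySem.Dict.empty).getD y PySem.Dict.empty).getD z "."
  else "."

theorem pv_chain (dA : GridT) (x y z : Int) :
    ((dA.get? x).bind (fun p => (p.get? y).bind (fun r => r.get? z))).getD "."
      = pvVal dA x y z := by
  unfold pvVal
  rcases hx : dA.get? x with _ | p
  · have hc : dA.contains x = false := by rw [PySem.Dict.contains_eq_isSome_get?, hx]; rfl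
    simp [hc]
  · have hcx : dA.contains x = true := by rw [PySem.Dict.contains_eq_isSome_get?, hx]; rfl
    have hgx : dA.getD x PySem.Dict.empty = p := PySem.Dict.getD_of_get?_eq_some _ _ hx
    rcases hy : p.get? y with _ | r
    · have hcy : p.contains y = false := by rw [PySem.Dict.contains_eq_isSome_get?, hy]; rfl
      simp [hy, hgx, hcy]
    · have hcy : p.contains y = true := by rw [PySem.Dict.contains_eq_isSome_get?, hy]; rfl
      have hgy : p.getD y PySem.Dict.empty = r := PySem.Dict.getD_of_get?_eq_some _ _ hy
      rcases hz : r.get? z with _ | v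
      · have hcz : r.contains z = false := by rw [PySem.Dict.contains_eq_isSome_get?, hz]; rfl
        simp [hy, hz, hgx, hgy, hcy, hcz, hcx]
      · have hcz : r.contains z = true := by rw [PySem.Dict.contains_eq_isSome_get?, hz]; rfl
        have hgz : r.getD z "." = v := PySem.Dict.getD_of_get?_eq_some _ _ hz
        simp [hy, hz, hgx, hgy, hgz, hcx, hcy, hcz]

-- bridge: pvFromD of a literal nested dict is the literal nested list (the "grid")
def pvGrid (xs ys zs : List Int) (f : Int → Int → Int → String) :
    List (Int × List (Int × List (Int × String))) :=
  xs.map (fun x => (x, ys.map (fun y => (y, zs.map (fun z => (z, f x y z))))))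

theorem pvFromD_mk_grid (xs ys zs : List Int) (v : Int → Int → Int → String) :
    pvFromD (PySem.Dict.mk (xs.map (fun x =>
        (x, PySem.Dict.mk (ys.map (fun y =>
          (y, PySem.Dict.mk (zs.map (fun z => (z, v x y z)))))))))) = pvGrid xs ys zs v := by
  simp [pvFromD, pvGrid, List.map_map, Function.comp]

-- ===== pvLk lemmas (first-match lookup on an association list) =====
theorem pvLk_cons {ν : Type} (k0 : Int) (v0 : ν) (t : List (Int × ν)) (k : Int) :
    pvLk ((k0, v0) :: t) k = if k0 == k then some v0 else pvLk t k := by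
  by_cases h : k0 = k <;> simp [pvLk, h]

theorem pvLk_eq_none {ν : Type} (t : List (Int × ν)) (k : Int)
    (h : k ∉ t.map Prod.fst) : pvLk t k = none := by
  simp only [pvLk, Option.map_eq_none_iff, List.find?_eq_none]
  intro p hp
  simp only [beq_iff_eq]
  exact fun hc => h (hc ▸ List.mem_map_of_mem hp)

theorem pvLk_of_mem {ν : Type} : ∀ (l : List (Int × ν)) (k : Int) (v : ν),
    (l.map Prod.fst).Nodup → (k, v) ∈ l → pvLk l k = some v := by
  intro l
  induction l with
  | nil => intro k v _ h; cases h
  | cons p t ih =>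
    intro k v hnd h
    simp only [List.map_cons, List.nodup_cons] at hnd
    rcases List.mem_cons.mp h with h | h
    · rw [← h, pvLk_cons]; simp
    · rw [pvLk_cons]
      have hne : p.1 ≠ k := fun hc => hnd.1 (hc ▸ List.mem_map_of_mem h)
      rw [if_neg (by simpa using hne)]
      exact ih k v hnd.2 h

theorem pv_get?_mk {ν : Type} (l : List (Int × ν)) (k : Int) :
    (PySem.Dict.mk l).get? k = pvLk l k := by
  induction l with
  | nil => rfl
  | cons p t ih =>
    rw [show p = (p.1, p.2) from rfl, PySem.Dict.get?_mk_cons, pvLk_cons, ih]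

theorem pv_get?_mk_map {ν μ : Type} (l : List (Int × ν)) (g : ν → μ) (k : Int) :
    (PySem.Dict.mk (l.map (fun q => (q.1, g q.2)))).get? k = (pvLk l k).map g := by
  induction l with
  | nil => rfl
  | cons p t ih =>
    rw [List.map_cons, PySem.Dict.get?_mk_cons, pvLk_cons, ih]
    by_cases h : p.1 = k <;> simp [h]

theorem pvGet_toD (arr : List (Int × List (Int × List (Int × String)))) (x : Int) :
    (pvToD arr).get? x
      = (pvLk arr x).map (fun l => PySem.Dict.mk (l.map (fun q => (q.1, PySem.Dict.mk q.2)))) := by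
  unfold pvToD
  exact pv_get?_mk_map arr (fun l => PySem.Dict.mk (l.map (fun q => (q.1, PySem.Dict.mk q.2)))) x

-- B's overlay value chain equals A's per-cell value
theorem pv_val_eq (arr : List (Int × List (Int × List (Int × String)))) (x y z : Int) :
    ((pvLk arr x).bind (fun p => (pvLk p y).bind (fun r => pvLk r z))).getD "."
      = pvVal (pvToD arr) x y z := by
  rw [← pv_chain]
  congr 1
  rw [pvGet_toD]
  cases hx : pvLk arr x with
  | none => rfl
  | some p =>
    simp only [Option.map_some, Option.bind_some]
    rw [pv_get?_mk_map]
    cases hy : pvLk p y with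
    | none => rfl
    | some r =>
      simp only [Option.map_some, Option.bind_some]
      exact pv_get?_mk r z

-- ===== B-side: shape (the overlay fold keeps the grid shape, updating the cell function) =====
theorem pvSet3_grid (xs ys zs : List Int) (f : Int → Int → Int → String) (x0 y0 z0 : Int) (v : String) :
    pvSet3 (pvGrid xs ys zs f) x0 y0 z0 v
      = pvGrid xs ys zs (fun x y z => if x = x0 ∧ y = y0 ∧ z = z0 then v else f x y z) := by
  unfold pvSet3 pvGrid
  rw [List.map_map]
  refine List.map_congr_left (fun x _ => ?_)
  simp only [Function.comp_apply]
  by_cases hx : x = x0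
  · subst hx
    simp only [beq_self_eq_true, if_true]
    refine congrArg _ ?_
    rw [List.map_map]
    refine List.map_congr_left (fun y _ => ?_)
    simp only [Function.comp_apply]
    by_cases hy : y = y0
    · subst hy
      simp only [beq_self_eq_true, if_true]
      refine congrArg _ ?_
      rw [List.map_map]
      refine List.map_congr_left (fun z _ => ?_)
      simp only [Function.comp_apply]
      by_cases hz : z = z0 <;> simp [hz]
    · simp [hy]
  · simp [hx]

-- the cell-function versions of the three overlay loops
def pvZF (mnz mxz x0 y0 : Int) (l : List (Int × String)) (f : Int → Int → Int → String) :
    Int → Int → Int → String :=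
  l.foldl (fun f zp => if mnz ≤ zp.1 ∧ zp.1 ≤ mxz then
    (fun x y z => if x = x0 ∧ y = y0 ∧ z = zp.1 then zp.2 else f x y z) else f) f

def pvYF (mny mxy mnz mxz x0 : Int) (l : List (Int × List (Int × String)))
    (f : Int → Int → Int → String) : Int → Int → Int → String :=
  l.foldl (fun f yp => if mny ≤ yp.1 ∧ yp.1 ≤ mxy then pvZF mnz mxz x0 yp.1 yp.2 f else f) f

def pvXF (mnx mxx mny mxy mnz mxz : Int) (l : List (Int × List (Int × List (Int × String))))
    (f : Int → Int → Int → String) : Int → Int → Int → String :=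
  l.foldl (fun f xp => if mnx ≤ xp.1 ∧ xp.1 ≤ mxx then pvYF mny mxy mnz mxz xp.1 xp.2 f else f) f

theorem pvB_zfold_grid (xs ys zs : List Int) (mnz mxz x0 y0 : Int) (l : List (Int × String)) :
    ∀ f, l.foldl (fun out zp =>
        if mnz ≤ zp.1 ∧ zp.1 ≤ mxz then pvSet3 out x0 y0 zp.1 zp.2 else out) (pvGrid xs ys zs f)
      = pvGrid xs ys zs (pvZF mnz mxz x0 y0 l f) := by
  induction l with
  | nil => intro f; rfl
  | cons zp t ih =>
    intro f
    simp only [List.foldl_cons, pvZF]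
    by_cases h : mnz ≤ zp.1 ∧ zp.1 ≤ mxz
    · rw [if_pos h, if_pos h, pvSet3_grid]; exact ih _
    · rw [if_neg h, if_neg h]; exact ih f

theorem pvB_yfold_grid (xs ys zs : List Int) (mny mxy mnz mxz x0 : Int)
    (l : List (Int × List (Int × String))) :
    ∀ f, l.foldl (fun out yp =>
        if mny ≤ yp.1 ∧ yp.1 ≤ mxy then
          yp.2.foldl (fun out zp =>
            if mnz ≤ zp.1 ∧ zp.1 ≤ mxz then pvSet3 out x0 yp.1 zp.1 zp.2 else out) out
        else out) (pvGrid xs ys zs f)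
      = pvGrid xs ys zs (pvYF mny mxy mnz mxz x0 l f) := by
  induction l with
  | nil => intro f; rfl
  | cons yp t ih =>
    intro f
    simp only [List.foldl_cons, pvYF]
    by_cases h : mny ≤ yp.1 ∧ yp.1 ≤ mxy
    · rw [if_pos h, if_pos h, pvB_zfold_grid]; exact ih _
    · rw [if_neg h, if_neg h]; exact ih f

theorem pvB_xfold_grid (xs ys zs : List Int) (mnx mxx mny mxy mnz mxz : Int)
    (l : List (Int × List (Int × List (Int × String)))) :
    ∀ f, l.foldl (fun out xp =>
        if mnx ≤ xp.1 ∧ xp.1 ≤ mxx then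
          xp.2.foldl (fun out yp =>
            if mny ≤ yp.1 ∧ yp.1 ≤ mxy then
              yp.2.foldl (fun out zp =>
                if mnz ≤ zp.1 ∧ zp.1 ≤ mxz then pvSet3 out xp.1 yp.1 zp.1 zp.2 else out) out
            else out) out
        else out) (pvGrid xs ys zs f)
      = pvGrid xs ys zs (pvXF mnx mxx mny mxy mnz mxz l f) := by
  induction l with
  | nil => intro f; rfl
  | cons xp t ih =>
    intro f
    simp only [List.foldl_cons, pvXF]
    by_cases h : mnx ≤ xp.1 ∧ xp.1 ≤ mxx
    · rw [if_pos h, if_pos h, pvB_yfold_grid]; exact ih _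
    · rw [if_neg h, if_neg h]; exact ih f

-- ===== B-side: value of the overlaid cell function =====
theorem pvZF_val (mnz mxz x0 y0 : Int) (l : List (Int × String))
    (hnd : (l.map Prod.fst).Nodup) (x y z : Int) (hz : mnz ≤ z ∧ z ≤ mxz) :
    ∀ f, pvZF mnz mxz x0 y0 l f x y z
      = if x = x0 ∧ y = y0 then (pvLk l z).getD (f x y z) else f x y z := by
  induction l with
  | nil =>
    intro f
    rw [pvLk_eq_none _ _ (by simp)]
    simp [pvZF]
  | cons zp t ih =>
    intro f
    simp only [List.map_cons, List.nodup_cons] at hnd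
    simp only [pvZF, List.foldl_cons]
    rw [pvLk_cons]
    by_cases hb : mnz ≤ zp.1 ∧ zp.1 ≤ mxz
    · rw [if_pos hb]
      rw [show (t.foldl _ _) = pvZF mnz mxz x0 y0 t _ from rfl, ih hnd.2]
      by_cases hxy : x = x0 ∧ y = y0
      · simp only [if_pos hxy]
        by_cases hzz : z = zp.1
        · rw [pvLk_eq_none t z (by rw [hzz]; exact hnd.1)]
          simp [hzz, hxy]
        · have : (zp.1 == z) = false := by
            simp only [beq_eq_false_iff_ne]; exact fun hc => hzz hc.symm
          rw [this, if_neg (fun hc => hzz hc.2.2)]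
          simp
      · simp only [if_neg hxy,
          if_neg (fun hc : x = x0 ∧ y = y0 ∧ z = zp.1 => hxy ⟨hc.1, hc.2.1⟩)]
    · rw [if_neg hb]
      rw [show (t.foldl _ _) = pvZF mnz mxz x0 y0 t f from rfl, ih hnd.2]
      have : (zp.1 == z) = false := by
        simp only [beq_eq_false_iff_ne]
        intro hc; rw [hc] at hb; omega
      rw [this]
      simp

theorem pvYF_val (mny mxy mnz mxz x0 : Int) (l : List (Int × List (Int × String)))
    (hnd : (l.map Prod.fst).Nodup) (hrows : ∀ r ∈ l, (r.2.map Prod.fst).Nodup)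
    (x y z : Int) (hy : mny ≤ y ∧ y ≤ mxy) (hz : mnz ≤ z ∧ z ≤ mxz) :
    ∀ f, pvYF mny mxy mnz mxz x0 l f x y z
      = if x = x0 then ((pvLk l y).bind (fun r => pvLk r z)).getD (f x y z) else f x y z := by
  induction l with
  | nil =>
    intro f
    rw [pvLk_eq_none _ _ (by simp)]
    simp [pvYF]
  | cons yp t ih =>
    intro f
    simp only [List.map_cons, List.nodup_cons] at hnd
    have hrow0 := hrows yp (List.mem_cons_self)
    have hrows' : ∀ r ∈ t, (r.2.map Prod.fst).Nodup := fun r hr => hrows r (List.mem_cons_of_mem _ hr)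
    simp only [pvYF, List.foldl_cons]
    rw [pvLk_cons]
    by_cases hb : mny ≤ yp.1 ∧ yp.1 ≤ mxy
    · rw [if_pos hb]
      rw [show (t.foldl _ _) = pvYF mny mxy mnz mxz x0 t _ from rfl, ih hnd.2 hrows',
          pvZF_val mnz mxz x0 yp.1 yp.2 hrow0 x y z hz]
      by_cases hxx : x = x0
      · simp only [if_pos hxx]
        by_cases hyy : y = yp.1
        · rw [pvLk_eq_none t y (by rw [hyy]; exact hnd.1)]
          simp [hyy, hxx]
        · have : (yp.1 == y) = false := by
            simp only [beq_eq_false_iff_ne]; exact fun hc => hyy hc.symm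
          rw [this, if_neg (fun hc => hyy hc.2)]
          simp
      · simp only [if_neg hxx, if_neg (fun hc : x = x0 ∧ y = yp.1 => hxx hc.1)]
    · rw [if_neg hb]
      rw [show (t.foldl _ _) = pvYF mny mxy mnz mxz x0 t f from rfl, ih hnd.2 hrows']
      have : (yp.1 == y) = false := by
        simp only [beq_eq_false_iff_ne]
        intro hc; rw [hc] at hb; omega
      rw [this]
      simp

theorem pvXF_val (mnx mxx mny mxy mnz mxz : Int) (l : List (Int × List (Int × List (Int × String))))
    (hnd : (l.map Prod.fst).Nodup)
    (hsub : ∀ p ∈ l, (p.2.map Prod.fst).Nodup ∧ ∀ q ∈ p.2, (q.2.map Prod.fst).Nodup)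
    (x y z : Int) (hx : mnx ≤ x ∧ x ≤ mxx) (hy : mny ≤ y ∧ y ≤ mxy) (hz : mnz ≤ z ∧ z ≤ mxz) :
    ∀ f, pvXF mnx mxx mny mxy mnz mxz l f x y z
      = ((pvLk l x).bind (fun p => (pvLk p y).bind (fun r => pvLk r z))).getD (f x y z) := by
  induction l with
  | nil =>
    intro f
    rw [pvLk_eq_none _ _ (by simp)]
    rfl
  | cons xp t ih =>
    intro f
    simp only [List.map_cons, List.nodup_cons] at hnd
    have hplane0 := (hsub xp (List.mem_cons_self)).1
    have hrows0 := (hsub xp (List.mem_cons_self)).2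
    have hsub' : ∀ p ∈ t, (p.2.map Prod.fst).Nodup ∧ ∀ q ∈ p.2, (q.2.map Prod.fst).Nodup :=
      fun p hp => hsub p (List.mem_cons_of_mem _ hp)
    simp only [pvXF, List.foldl_cons]
    rw [pvLk_cons]
    by_cases hb : mnx ≤ xp.1 ∧ xp.1 ≤ mxx
    · rw [if_pos hb]
      rw [show (t.foldl _ _) = pvXF mnx mxx mny mxy mnz mxz t _ from rfl, ih hnd.2 hsub',
          pvYF_val mny mxy mnz mxz xp.1 xp.2 hplane0 hrows0 x y z hy hz]
      by_cases hxx : x = xp.1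
      · rw [pvLk_eq_none t x (by rw [hxx]; exact hnd.1)]
        simp [hxx]
      · have : (xp.1 == x) = false := by
          simp only [beq_eq_false_iff_ne]; exact fun hc => hxx hc.symm
        rw [this, if_neg hxx]
        simp
    · rw [if_neg hb]
      rw [show (t.foldl _ _) = pvXF mnx mxx mny mxy mnz mxz t f from rfl, ih hnd.2 hsub']
      have : (xp.1 == x) = false := by
        simp only [beq_eq_false_iff_ne]
        intro hc; rw [hc] at hb; omega
      rw [this]
      simp

theorem pvGrid_congr (xs ys zs : List Int) (f g : Int → Int → Int → String)
    (h : ∀ x ∈ xs, ∀ y ∈ ys, ∀ z ∈ zs, f x y z = g x y z) :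
    pvGrid xs ys zs f = pvGrid xs ys zs g := by
  unfold pvGrid
  refine List.map_congr_left (fun x hx => ?_)
  refine congrArg _ (List.map_congr_left (fun y hy => ?_))
  refine congrArg _ (List.map_congr_left (fun z hz => ?_))
  rw [h x hx y hy z hz]

-- ===== VERDICT (by name: the statement is the Claim_ definition above) =====
theorem copyExpand_spec : Claim_equal_copyExpand := by
  intro arr _ hpre
  unfold Spec_copyExpand
  obtain ⟨hnd1, hnd2, p, hp, hp0, -, q, hq, hq0, -⟩ := hpre
  have hmemp : ((0 : Int), p.2) ∈ arr := by rw [← hp0]; exact hp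
  have hmemq : ((0 : Int), q.2) ∈ p.2 := by rw [← hq0]; exact hq
  have hLkA : pvLk arr 0 = some p.2 := pvLk_of_mem arr 0 p.2 hnd1 hmemp
  have hLkB : pvLk p.2 0 = some q.2 := pvLk_of_mem p.2 0 q.2 (hnd2 p hp).1 hmemq
  have hkeys : (pvToD arr).keys = arr.map Prod.fst := by
    simp [pvToD, PySem.Dict.keys]
  have hp0A : (pvToD arr).getD 0 PySem.Dict.empty
      = PySem.Dict.mk (p.2.map (fun q => (q.1, PySem.Dict.mk q.2))) := by
    apply PySem.Dict.getD_of_get?_eq_some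
    rw [pvGet_toD, hLkA]; rfl
  have hr0A : (PySem.Dict.mk (p.2.map (fun q => (q.1, PySem.Dict.mk q.2)))).getD 0 PySem.Dict.empty
      = PySem.Dict.mk q.2 := by
    apply PySem.Dict.getD_of_get?_eq_some
    rw [pv_get?_mk_map, hLkB]; rfl
  have hkeysp : (PySem.Dict.mk (p.2.map (fun q => (q.1, PySem.Dict.mk q.2)))).keys
      = p.2.map Prod.fst := by
    simp [PySem.Dict.keys]
  have hkeysq : (PySem.Dict.mk q.2).keys = q.2.map Prod.fst := by
    simp [PySem.Dict.keys]
  simp only [copyExpand, copyExpand_alt, hkeys, hp0A, hr0A, hkeysp, hkeysq, hLkA, hLkB,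
    Option.getD_some]
  rw [pvA_grid0 _ _ _ _ (PySem.List.nodup_pyRange_one _ _) (PySem.List.nodup_pyRange_one _ _)
      (PySem.List.nodup_pyRange_one _ _), pvFromD_mk_grid]
  rw [show ((PySem.List.pyRange ((PySem.List.min? (arr.map Prod.fst) (fun k => k)).getD 0 - 1)
        ((PySem.List.max? (arr.map Prod.fst) (fun k => k)).getD 0 + 1 + 1) 1).map (fun x =>
      (x, (PySem.List.pyRange ((PySem.List.min? (p.2.map Prod.fst) (fun k => k)).getD 0 - 1)
        ((PySem.List.max? (p.2.map Prod.fst) (fun k => k)).getD 0 + 1 + 1) 1).map (fun y =>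
      (y, (PySem.List.pyRange ((PySem.List.min? (q.2.map Prod.fst) (fun k => k)).getD 0 - 1)
        ((PySem.List.max? (q.2.map Prod.fst) (fun k => k)).getD 0 + 1 + 1) 1).map (fun z =>
      (z, ".")))))))
      = pvGrid (PySem.List.pyRange ((PySem.List.min? (arr.map Prod.fst) (fun k => k)).getD 0 - 1)
          ((PySem.List.max? (arr.map Prod.fst) (fun k => k)).getD 0 + 1 + 1) 1)
        (PySem.List.pyRange ((PySem.List.min? (p.2.map Prod.fst) (fun k => k)).getD 0 - 1)
          ((PySem.List.max? (p.2.map Prod.fst) (fun k => k)).getD 0 + 1 + 1) 1)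
        (PySem.List.pyRange ((PySem.List.min? (q.2.map Prod.fst) (fun k => k)).getD 0 - 1)
          ((PySem.List.max? (q.2.map Prod.fst) (fun k => k)).getD 0 + 1 + 1) 1)
        (fun _ _ _ => ".") from rfl]
  rw [pvB_xfold_grid]
  refine pvGrid_congr _ _ _ _ _ (fun x hx y hy z hz => ?_)
  have hnd2' : ∀ r ∈ arr, (r.2.map Prod.fst).Nodup ∧ ∀ s ∈ r.2, (s.2.map Prod.fst).Nodup := hnd2
  rw [pvXF_val _ _ _ _ _ _ arr hnd1 hnd2' x y z
      (by rw [PySem.List.mem_pyRange_one] at hx; omega)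
      (by rw [PySem.List.mem_pyRange_one] at hy; omega)
      (by rw [PySem.List.mem_pyRange_one] at hz; omega)]
  exact (pv_val_eq arr x y z).symm
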